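-- pv_equiv track=rewrite | github.com/ShathaVarsha/Multimodal-Mental-Health-Screening-System-using-Text-and-Video-Cues-DAIC-WOZ-Dataset- | step8_web_enhanced.py | generate_adaptive_followup
-- ===== SOURCE A (Python) =====
-- def generate_adaptive_followup(answer, question_idx):
--     """Generate contextual follow-up question based on answer"""
--     answer_lower = answer.lower()
--
--     # Only ask follow-up if answer suggests a problem (not for "fine" or "no issues")
--     positive_indicators = ['fine', 'good', 'great', 'normal', 'no problem', 'not really', 'rarely', 'not at all']
--     if any(indicator in answer_lower for indicator in positive_indicators):
--         return None  # No follow-up needed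
--
--     # Question-specific follow-ups
--     if question_idx == 0:  # Interest/pleasure
--         if any(word in answer_lower for word in ['lost', 'no', 'little', 'none', 'not interested']):
--             return "That sounds difficult. What activities have you lost interest in?"
--
--     elif question_idx == 1:  # Feeling down
--         if any(word in answer_lower for word in ['down', 'depressed', 'hopeless', 'sad', 'low']):
--             return "I understand. Can you tell me what that feels like for you?"
--
--     elif question_idx == 2:  # Sleep
--         if any(word in answer_lower for word in ['trouble', 'insomnia', 'cant sleep', 'wake', 'too much']):
--             return "Sleep issues can be really tough. About how many hours are you getting per night?"
--
--     elif question_idx == 3:  # Energy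
--         if any(word in answer_lower for word in ['tired', 'exhausted', 'no energy', 'fatigue', 'drained']):
--             return "Low energy can be challenging. Does this affect your daily activities?"
--
--     elif question_idx == 4:  # Appetite
--         if any(word in answer_lower for word in ['no appetite', 'overeating', 'too much', 'too little', 'weight']):
--             return "Changes in appetite can be concerning. Have you noticed any weight changes?"
--
--     elif question_idx == 5:  # Self-worth
--         if any(word in answer_lower for word in ['failure', 'worthless', 'disappointed', 'guilty', 'bad']):
--             return "Those feelings sound really hard. What makes you feel this way?"
--
--     elif question_idx == 6:  # Concentration
--         if any(word in answer_lower for word in ['trouble', 'cant focus', 'distracted', 'hard to', 'difficult']):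
--             return "Concentration difficulties can be frustrating. When do you notice this most?"
--
--     elif question_idx == 7:  # Psychomotor
--         if any(word in answer_lower for word in ['slow', 'restless', 'fidgety', 'agitated', 'moving']):
--             return "Have others mentioned noticing these changes in how you move or speak?"
--
--     return None  # No follow-up needed
-- ===== SOURCE B (Python) =====
-- # B: one flat rule list scanned once, first match wins (guard rules first, response None),
-- # instead of A's guard + eight-branch if/elif dispatch with per-branch any().
-- _RULES = [
--     (None, 'fine', None),
--     (None, 'good', None),
--     (None, 'great', None),
--     (None, 'normal', None),
--     (None, 'no problem', None),
--     (None, 'not really', None),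
--     (None, 'rarely', None),
--     (None, 'not at all', None),
--     (0, 'lost', "That sounds difficult. What activities have you lost interest in?"),
--     (0, 'no', "That sounds difficult. What activities have you lost interest in?"),
--     (0, 'little', "That sounds difficult. What activities have you lost interest in?"),
--     (0, 'none', "That sounds difficult. What activities have you lost interest in?"),
--     (0, 'not interested', "That sounds difficult. What activities have you lost interest in?"),
--     (1, 'down', "I understand. Can you tell me what that feels like for you?"),
--     (1, 'depressed', "I understand. Can you tell me what that feels like for you?"),
--     (1, 'hopeless', "I understand. Can you tell me what that feels like for you?"),
--     (1, 'sad', "I understand. Can you tell me what that feels like for you?"),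
--     (1, 'low', "I understand. Can you tell me what that feels like for you?"),
--     (2, 'trouble', "Sleep issues can be really tough. About how many hours are you getting per night?"),
--     (2, 'insomnia', "Sleep issues can be really tough. About how many hours are you getting per night?"),
--     (2, 'cant sleep', "Sleep issues can be really tough. About how many hours are you getting per night?"),
--     (2, 'wake', "Sleep issues can be really tough. About how many hours are you getting per night?"),
--     (2, 'too much', "Sleep issues can be really tough. About how many hours are you getting per night?"),
--     (3, 'tired', "Low energy can be challenging. Does this affect your daily activities?"),
--     (3, 'exhausted', "Low energy can be challenging. Does this affect your daily activities?"),
--     (3, 'no energy', "Low energy can be challenging. Does this affect your daily activities?"),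
--     (3, 'fatigue', "Low energy can be challenging. Does this affect your daily activities?"),
--     (3, 'drained', "Low energy can be challenging. Does this affect your daily activities?"),
--     (4, 'no appetite', "Changes in appetite can be concerning. Have you noticed any weight changes?"),
--     (4, 'overeating', "Changes in appetite can be concerning. Have you noticed any weight changes?"),
--     (4, 'too much', "Changes in appetite can be concerning. Have you noticed any weight changes?"),
--     (4, 'too little', "Changes in appetite can be concerning. Have you noticed any weight changes?"),
--     (4, 'weight', "Changes in appetite can be concerning. Have you noticed any weight changes?"),
--     (5, 'failure', "Those feelings sound really hard. What makes you feel this way?"),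
--     (5, 'worthless', "Those feelings sound really hard. What makes you feel this way?"),
--     (5, 'disappointed', "Those feelings sound really hard. What makes you feel this way?"),
--     (5, 'guilty', "Those feelings sound really hard. What makes you feel this way?"),
--     (5, 'bad', "Those feelings sound really hard. What makes you feel this way?"),
--     (6, 'trouble', "Concentration difficulties can be frustrating. When do you notice this most?"),
--     (6, 'cant focus', "Concentration difficulties can be frustrating. When do you notice this most?"),
--     (6, 'distracted', "Concentration difficulties can be frustrating. When do you notice this most?"),
--     (6, 'hard to', "Concentration difficulties can be frustrating. When do you notice this most?"),
--     (6, 'difficult', "Concentration difficulties can be frustrating. When do you notice this most?"),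
--     (7, 'slow', "Have others mentioned noticing these changes in how you move or speak?"),
--     (7, 'restless', "Have others mentioned noticing these changes in how you move or speak?"),
--     (7, 'fidgety', "Have others mentioned noticing these changes in how you move or speak?"),
--     (7, 'agitated', "Have others mentioned noticing these changes in how you move or speak?"),
--     (7, 'moving', "Have others mentioned noticing these changes in how you move or speak?"),
-- ]
--
-- def generate_adaptive_followup(answer, question_idx):
--     """Generate contextual follow-up question based on answer (flat rule scan)."""
--     answer_lower = answer.lower()
--     for qi, pattern, response in _RULES:
--         if (qi is None or qi == question_idx) and pattern in answer_lower:
--             return response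
--     return None
-- ===== Notes on version B (the rewrite author's own statement) =====
-- stated objective: alternative
-- what changed: Replaced the guard + eight-branch if/elif dispatch with per-branch any() scans by one flat first-match-wins linear scan over a single list of (question, pattern, response) rule triples, where the positive indicators are ordinary rules (response None) placed first.
import Mathlib
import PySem

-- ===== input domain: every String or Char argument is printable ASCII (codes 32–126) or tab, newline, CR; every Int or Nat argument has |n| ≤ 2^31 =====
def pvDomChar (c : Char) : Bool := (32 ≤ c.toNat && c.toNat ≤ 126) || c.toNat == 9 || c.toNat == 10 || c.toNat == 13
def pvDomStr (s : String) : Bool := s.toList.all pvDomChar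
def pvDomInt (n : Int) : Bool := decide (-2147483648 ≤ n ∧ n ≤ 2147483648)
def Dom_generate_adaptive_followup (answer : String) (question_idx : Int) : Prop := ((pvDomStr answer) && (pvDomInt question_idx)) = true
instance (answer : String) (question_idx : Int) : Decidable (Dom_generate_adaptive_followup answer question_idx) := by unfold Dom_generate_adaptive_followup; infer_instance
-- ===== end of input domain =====

-- B replaces A's guard + eight-branch if/elif dispatch by a single first-match scan
-- over one flat list of (question, pattern, response) rule triples; same return values.

-- ===== PORT A =====
def generate_adaptive_followup (answer : String) (question_idx : Int) : Option String :=
  let answer_lower := PySem.Str.lower answer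
  let positive_indicators := ["fine", "good", "great", "normal", "no problem", "not really", "rarely", "not at all"]
  if positive_indicators.any (fun indicator => PySem.Str.isIn indicator answer_lower) then
    none
  else if question_idx == 0 then
    if (["lost", "no", "little", "none", "not interested"]).any (fun word => PySem.Str.isIn word answer_lower) then
      some "That sounds difficult. What activities have you lost interest in?"
    else none
  else if question_idx == 1 then
    if (["down", "depressed", "hopeless", "sad", "low"]).any (fun word => PySem.Str.isIn word answer_lower) then
      some "I understand. Can you tell me what that feels like for you?"
    else none
  else if question_idx == 2 then
    if (["trouble", "insomnia", "cant sleep", "wake", "too much"]).any (fun word => PySem.Str.isIn word answer_lower) then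
      some "Sleep issues can be really tough. About how many hours are you getting per night?"
    else none
  else if question_idx == 3 then
    if (["tired", "exhausted", "no energy", "fatigue", "drained"]).any (fun word => PySem.Str.isIn word answer_lower) then
      some "Low energy can be challenging. Does this affect your daily activities?"
    else none
  else if question_idx == 4 then
    if (["no appetite", "overeating", "too much", "too little", "weight"]).any (fun word => PySem.Str.isIn word answer_lower) then
      some "Changes in appetite can be concerning. Have you noticed any weight changes?"
    else none
  else if question_idx == 5 then
    if (["failure", "worthless", "disappointed", "guilty", "bad"]).any (fun word => PySem.Str.isIn word answer_lower) then
      some "Those feelings sound really hard. What makes you feel this way?"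
    else none
  else if question_idx == 6 then
    if (["trouble", "cant focus", "distracted", "hard to", "difficult"]).any (fun word => PySem.Str.isIn word answer_lower) then
      some "Concentration difficulties can be frustrating. When do you notice this most?"
    else none
  else if question_idx == 7 then
    if (["slow", "restless", "fidgety", "agitated", "moving"]).any (fun word => PySem.Str.isIn word answer_lower) then
      some "Have others mentioned noticing these changes in how you move or speak?"
    else none
  else
    none

-- ===== PORT B =====
def pvRules : List (Option Int × String × Option String) :=
  [ (none, "fine", none),
    (none, "good", none),
    (none, "great", none),
    (none, "normal", none),
    (none, "no problem", none),
    (none, "not really", none),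
    (none, "rarely", none),
    (none, "not at all", none),
    (some 0, "lost", some "That sounds difficult. What activities have you lost interest in?"),
    (some 0, "no", some "That sounds difficult. What activities have you lost interest in?"),
    (some 0, "little", some "That sounds difficult. What activities have you lost interest in?"),
    (some 0, "none", some "That sounds difficult. What activities have you lost interest in?"),
    (some 0, "not interested", some "That sounds difficult. What activities have you lost interest in?"),
    (some 1, "down", some "I understand. Can you tell me what that feels like for you?"),
    (some 1, "depressed", some "I understand. Can you tell me what that feels like for you?"),
    (some 1, "hopeless", some "I understand. Can you tell me what that feels like for you?"),
    (some 1, "sad", some "I understand. Can you tell me what that feels like for you?"),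
    (some 1, "low", some "I understand. Can you tell me what that feels like for you?"),
    (some 2, "trouble", some "Sleep issues can be really tough. About how many hours are you getting per night?"),
    (some 2, "insomnia", some "Sleep issues can be really tough. About how many hours are you getting per night?"),
    (some 2, "cant sleep", some "Sleep issues can be really tough. About how many hours are you getting per night?"),
    (some 2, "wake", some "Sleep issues can be really tough. About how many hours are you getting per night?"),
    (some 2, "too much", some "Sleep issues can be really tough. About how many hours are you getting per night?"),
    (some 3, "tired", some "Low energy can be challenging. Does this affect your daily activities?"),
    (some 3, "exhausted", some "Low energy can be challenging. Does this affect your daily activities?"),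
    (some 3, "no energy", some "Low energy can be challenging. Does this affect your daily activities?"),
    (some 3, "fatigue", some "Low energy can be challenging. Does this affect your daily activities?"),
    (some 3, "drained", some "Low energy can be challenging. Does this affect your daily activities?"),
    (some 4, "no appetite", some "Changes in appetite can be concerning. Have you noticed any weight changes?"),
    (some 4, "overeating", some "Changes in appetite can be concerning. Have you noticed any weight changes?"),
    (some 4, "too much", some "Changes in appetite can be concerning. Have you noticed any weight changes?"),
    (some 4, "too little", some "Changes in appetite can be concerning. Have you noticed any weight changes?"),
    (some 4, "weight", some "Changes in appetite can be concerning. Have you noticed any weight changes?"),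
    (some 5, "failure", some "Those feelings sound really hard. What makes you feel this way?"),
    (some 5, "worthless", some "Those feelings sound really hard. What makes you feel this way?"),
    (some 5, "disappointed", some "Those feelings sound really hard. What makes you feel this way?"),
    (some 5, "guilty", some "Those feelings sound really hard. What makes you feel this way?"),
    (some 5, "bad", some "Those feelings sound really hard. What makes you feel this way?"),
    (some 6, "trouble", some "Concentration difficulties can be frustrating. When do you notice this most?"),
    (some 6, "cant focus", some "Concentration difficulties can be frustrating. When do you notice this most?"),
    (some 6, "distracted", some "Concentration difficulties can be frustrating. When do you notice this most?"),
    (some 6, "hard to", some "Concentration difficulties can be frustrating. When do you notice this most?"),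
    (some 6, "difficult", some "Concentration difficulties can be frustrating. When do you notice this most?"),
    (some 7, "slow", some "Have others mentioned noticing these changes in how you move or speak?"),
    (some 7, "restless", some "Have others mentioned noticing these changes in how you move or speak?"),
    (some 7, "fidgety", some "Have others mentioned noticing these changes in how you move or speak?"),
    (some 7, "agitated", some "Have others mentioned noticing these changes in how you move or speak?"),
    (some 7, "moving", some "Have others mentioned noticing these changes in how you move or speak?") ]

-- the for-loop of Source B: scan the rules, first match returns its response
def pvScanRules (rules : List (Option Int × String × Option String))
    (answer_lower : String) (question_idx : Int) : Option String :=
  match rules with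
  | [] => none
  | (qi, pattern, response) :: rest =>
    if (qi.elim true (fun k => k == question_idx)) && PySem.Str.isIn pattern answer_lower then
      response
    else pvScanRules rest answer_lower question_idx

def generate_adaptive_followup_alt (answer : String) (question_idx : Int) : Option String :=
  pvScanRules pvRules (PySem.Str.lower answer) question_idx


-- ===== PRECONDITION & SPEC =====
def Spec_generate_adaptive_followup (answer : String) (question_idx : Int) (out : Option String) : Prop := out = generate_adaptive_followup_alt answer question_idx
instance (answer : String) (question_idx : Int) (out : Option String) : Decidable (Spec_generate_adaptive_followup answer question_idx out) := by unfold Spec_generate_adaptive_followup; infer_instance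

-- ===== CLAIM (what is proved, stated in full; the proofs are below) =====
def Claim_equal_generate_adaptive_followup : Prop := ∀ (answer : String) (question_idx : Int), Dom_generate_adaptive_followup answer question_idx → Spec_generate_adaptive_followup answer question_idx (generate_adaptive_followup answer question_idx)

-- ===== LEMMAS AND PROOFS =====

-- splitting a ||-guard into two nested ifs with the same then-value
theorem pvChainOr (a b : Bool) (t e : Option String) :
    (if a || b then t else e) = if a then t else if b then t else e := by
  cases a <;> simp


-- ===== VERDICT (by name: the statement is the Claim_ definition above) =====
theorem generate_adaptive_followup_spec : Claim_equal_generate_adaptive_followup := by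
  intro answer question_idx _
  unfold Spec_generate_adaptive_followup generate_adaptive_followup generate_adaptive_followup_alt
  by_cases h0 : question_idx = 0
  · subst h0; simp only [pvRules, pvScanRules, Option.elim, List.any_cons, List.any_nil,
      Bool.or_false, Bool.true_and, Int.reduceBEq, Bool.false_and, if_false, Bool.false_eq_true,
      beq_self_eq_true, if_true, pvChainOr]
  · by_cases h1 : question_idx = 1
    · subst h1; simp only [pvRules, pvScanRules, Option.elim, List.any_cons, List.any_nil,
      Bool.or_false, Bool.true_and, Int.reduceBEq, Bool.false_and, if_false, Bool.false_eq_true,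
      beq_self_eq_true, if_true, pvChainOr]
    · by_cases h2 : question_idx = 2
      · subst h2; simp only [pvRules, pvScanRules, Option.elim, List.any_cons, List.any_nil,
      Bool.or_false, Bool.true_and, Int.reduceBEq, Bool.false_and, if_false, Bool.false_eq_true,
      beq_self_eq_true, if_true, pvChainOr]
      · by_cases h3 : question_idx = 3
        · subst h3; simp only [pvRules, pvScanRules, Option.elim, List.any_cons, List.any_nil,
      Bool.or_false, Bool.true_and, Int.reduceBEq, Bool.false_and, if_false, Bool.false_eq_true,
      beq_self_eq_true, if_true, pvChainOr]
        · by_cases h4 : question_idx = 4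
          · subst h4; simp only [pvRules, pvScanRules, Option.elim, List.any_cons, List.any_nil,
      Bool.or_false, Bool.true_and, Int.reduceBEq, Bool.false_and, if_false, Bool.false_eq_true,
      beq_self_eq_true, if_true, pvChainOr]
          · by_cases h5 : question_idx = 5
            · subst h5; simp only [pvRules, pvScanRules, Option.elim, List.any_cons, List.any_nil,
      Bool.or_false, Bool.true_and, Int.reduceBEq, Bool.false_and, if_false, Bool.false_eq_true,
      beq_self_eq_true, if_true, pvChainOr]
            · by_cases h6 : question_idx = 6
              · subst h6; simp only [pvRules, pvScanRules, Option.elim, List.any_cons, List.any_nil,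
      Bool.or_false, Bool.true_and, Int.reduceBEq, Bool.false_and, if_false, Bool.false_eq_true,
      beq_self_eq_true, if_true, pvChainOr]
              · by_cases h7 : question_idx = 7
                · subst h7; simp only [pvRules, pvScanRules, Option.elim, List.any_cons, List.any_nil,
      Bool.or_false, Bool.true_and, Int.reduceBEq, Bool.false_and, if_false, Bool.false_eq_true,
      beq_self_eq_true, if_true, pvChainOr]
                · have e0 : ((0:Int) == question_idx) = false := by rw [beq_eq_false_iff_ne]; exact fun h => h0 h.symm
                  have f0 : (question_idx == (0:Int)) = false := by rw [beq_eq_false_iff_ne]; exact h0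
                  have e1 : ((1:Int) == question_idx) = false := by rw [beq_eq_false_iff_ne]; exact fun h => h1 h.symm
                  have f1 : (question_idx == (1:Int)) = false := by rw [beq_eq_false_iff_ne]; exact h1
                  have e2 : ((2:Int) == question_idx) = false := by rw [beq_eq_false_iff_ne]; exact fun h => h2 h.symm
                  have f2 : (question_idx == (2:Int)) = false := by rw [beq_eq_false_iff_ne]; exact h2
                  have e3 : ((3:Int) == question_idx) = false := by rw [beq_eq_false_iff_ne]; exact fun h => h3 h.symm
                  have f3 : (question_idx == (3:Int)) = false := by rw [beq_eq_false_iff_ne]; exact h3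
                  have e4 : ((4:Int) == question_idx) = false := by rw [beq_eq_false_iff_ne]; exact fun h => h4 h.symm
                  have f4 : (question_idx == (4:Int)) = false := by rw [beq_eq_false_iff_ne]; exact h4
                  have e5 : ((5:Int) == question_idx) = false := by rw [beq_eq_false_iff_ne]; exact fun h => h5 h.symm
                  have f5 : (question_idx == (5:Int)) = false := by rw [beq_eq_false_iff_ne]; exact h5
                  have e6 : ((6:Int) == question_idx) = false := by rw [beq_eq_false_iff_ne]; exact fun h => h6 h.symm
                  have f6 : (question_idx == (6:Int)) = false := by rw [beq_eq_false_iff_ne]; exact h6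
                  have e7 : ((7:Int) == question_idx) = false := by rw [beq_eq_false_iff_ne]; exact fun h => h7 h.symm
                  have f7 : (question_idx == (7:Int)) = false := by rw [beq_eq_false_iff_ne]; exact h7
                  simp only [pvRules, pvScanRules, Option.elim, List.any_cons, List.any_nil,
      Bool.or_false, Bool.true_and, Bool.false_and, if_false, Bool.false_eq_true,
      pvChainOr,
                      e0, e1, e2, e3, e4, e5, e6, e7, f0, f1, f2, f3, f4, f5, f6, f7]
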